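-- pv_equiv track=rewrite | github.com/sarusso/Timeseria | timeseria/models.py | to_window_datapoints_matrix
-- ===== SOURCE A (Python) =====
-- def to_window_datapoints_matrix(timeseries, window, forecast_n, encoder=None):
--     '''Compute window datapoints matrix'''
--
--     window_datapoints = []
--     for i, _ in enumerate(timeseries):
--         if i <  window:
--             continue
--         if i == len(timeseries)-forecast_n:
--             break
--
--         # Add window values
--         row = []
--         for j in range(window):
--             row.append(timeseries[i-window+j])
--         window_datapoints.append(row)
--
--     return window_datapoints
-- ===== SOURCE B (Python) =====
-- def to_window_datapoints_matrix(timeseries, window, forecast_n, encoder=None):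
--     '''Compute window datapoints matrix'''
--     rows = []
--     buf = []
--     for i, datapoint in enumerate(timeseries):
--         if i >= window:
--             if i == len(timeseries) - forecast_n:
--                 break
--             rows.append(buf[:])
--         buf.append(datapoint)
--         if len(buf) > window:
--             buf.pop(0)
--     return rows
-- ===== Notes on version B (the rewrite author's own statement) =====
-- stated objective: alternative
-- what changed: Replaces the nested backward-indexing loop (for each valid i, an inner range(window) loop re-reading timeseries[i-window+j]) by a single forward pass that maintains a rolling window buffer (append + pop(0)) and snapshots it as each row.
import Mathlib
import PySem

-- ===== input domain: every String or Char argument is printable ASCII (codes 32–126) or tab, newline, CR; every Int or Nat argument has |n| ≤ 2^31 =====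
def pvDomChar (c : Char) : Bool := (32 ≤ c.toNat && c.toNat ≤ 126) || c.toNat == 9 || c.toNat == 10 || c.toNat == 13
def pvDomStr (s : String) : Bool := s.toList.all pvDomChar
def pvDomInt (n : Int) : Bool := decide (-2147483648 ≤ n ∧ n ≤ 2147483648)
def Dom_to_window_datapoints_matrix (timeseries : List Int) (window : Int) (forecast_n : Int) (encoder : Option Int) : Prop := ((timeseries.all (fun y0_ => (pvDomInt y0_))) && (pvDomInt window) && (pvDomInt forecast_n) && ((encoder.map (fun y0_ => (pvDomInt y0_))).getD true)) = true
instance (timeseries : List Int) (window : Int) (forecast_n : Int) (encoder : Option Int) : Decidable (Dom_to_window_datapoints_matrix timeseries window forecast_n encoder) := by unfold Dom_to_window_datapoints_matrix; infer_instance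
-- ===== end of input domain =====

-- B replaces A's nested backward-indexing loop by a single forward pass maintaining a rolling window buffer; objective: alternative, same cost.


-- ===== PORT A =====
-- inner loop: row = [timeseries[i-window+j] for j in range(window)] (index provably in range when reached)
def twRowA (ts : List Int) (window i : Int) : List Int :=
  (PySem.List.pyRange 0 window 1).foldl (fun r j => r ++ [PySem.List.pyGetD ts (i - window + j) 0]) []

-- 'for i, _ in enumerate(timeseries): …' with continue/break, index carried explicitly
def twLoopA (ts : List Int) (window cut : Int) : Int → List Int → List (List Int) → List (List Int)
  | _, [], acc => acc
  | i, _ :: rest, acc =>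
    if i < window then twLoopA ts window cut (i + 1) rest acc
    else if i = cut then acc
    else twLoopA ts window cut (i + 1) rest (acc ++ [twRowA ts window i])

def to_window_datapoints_matrix (timeseries : List Int) (window : Int) (forecast_n : Int) (encoder : Option Int) : List (List Int) :=
  twLoopA timeseries window ((timeseries.length : Int) - forecast_n) 0 timeseries []

-- ===== PORT B =====
-- buf.append(datapoint); if len(buf) > window: buf.pop(0)
def twStep (window : Int) (buf : List Int) (dp : Int) : List Int :=
  let b := buf ++ [dp]
  if window < (b.length : Int) then b.drop 1 else b

-- the single forward pass over enumerate(timeseries), with break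
def twLoopB (window cut : Int) : Int → List Int → List (List Int) → List Int → List (List Int)
  | _, [], rows, _ => rows
  | i, dp :: rest, rows, buf =>
    if window ≤ i then
      if i = cut then rows
      else twLoopB window cut (i + 1) rest (rows ++ [buf]) (twStep window buf dp)
    else twLoopB window cut (i + 1) rest rows (twStep window buf dp)

def to_window_datapoints_matrix_alt (timeseries : List Int) (window : Int) (forecast_n : Int) (encoder : Option Int) : List (List Int) :=
  twLoopB window ((timeseries.length : Int) - forecast_n) 0 timeseries [] []

-- ===== PRECONDITION & SPEC =====
def Spec_to_window_datapoints_matrix (timeseries : List Int) (window : Int) (forecast_n : Int) (encoder : Option Int) (out : List (List Int)) : Prop := out = to_window_datapoints_matrix_alt timeseries window forecast_n encoder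
instance (timeseries : List Int) (window : Int) (forecast_n : Int) (encoder : Option Int) (out : List (List Int)) : Decidable (Spec_to_window_datapoints_matrix timeseries window forecast_n encoder out) := by unfold Spec_to_window_datapoints_matrix; infer_instance

-- ===== CLAIM (what is proved, stated in full; the proofs are below) =====
def Claim_equal_to_window_datapoints_matrix : Prop := ∀ (timeseries : List Int) (window : Int) (forecast_n : Int) (encoder : Option Int), Dom_to_window_datapoints_matrix timeseries window forecast_n encoder → Spec_to_window_datapoints_matrix timeseries window forecast_n encoder (to_window_datapoints_matrix timeseries window forecast_n encoder)

-- ===== LEMMAS AND PROOFS =====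

-- the index where the loops stop producing rows, as a function of the first producing index s
def twStop (cut L s : Int) : Int := if s ≤ cut ∧ cut < L then cut else L

-- A's inner row equals a slice
lemma twRowA_eq_slice (ts : List Int) (w i : Int)
    (h1 : max w 0 ≤ i) (h2 : i ≤ (ts.length : Int)) :
    twRowA ts w i = PySem.List.slice ts (some (i - w)) (some i) := by
  have hi0 : 0 ≤ i := le_trans (le_max_right _ _) h1
  by_cases hw : w ≤ 0
  · have hr : PySem.List.pyRange 0 w 1 = [] := PySem.List.pyRange_one_eq_nil hw
    have hs := PySem.List.slice_toNat ts (a := i - w) (b := i) (by omega) hi0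
    simp [twRowA, hr, hs]
    omega
  · rw [not_le] at hw
    have hiw : 0 ≤ i - w := by have := le_max_left w 0; omega
    have hfold : twRowA ts w i
        = (PySem.List.pyRange 0 w 1).map (fun j => PySem.List.pyGetD ts (i - w + j) 0) := by
      simpa [twRowA] using
        PySem.List.foldl_append_singleton_eq_map
          (fun j => PySem.List.pyGetD ts (i - w + j) 0) (PySem.List.pyRange 0 w 1) []
    have hshift : (PySem.List.pyRange 0 w 1).map (fun j => PySem.List.pyGetD ts (i - w + j) 0)
        = (PySem.List.pyRange (i - w) i 1).map (fun j => PySem.List.pyGetD ts j 0) := by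
      rw [PySem.List.pyRange_one 0 w, PySem.List.pyRange_one (i - w) i]
      have : (w - 0).toNat = (i - (i - w)).toNat := by omega
      rw [this]
      simp only [List.map_map]
      exact List.map_congr_left (fun k _ => by
        simp only [Function.comp_apply]
        congr 1
        omega)
    have hsplit : PySem.List.pyRange (i - w) (ts.length : Int) 1
        = PySem.List.pyRange (i - w) i 1 ++ PySem.List.pyRange i (ts.length : Int) 1 :=
      PySem.List.pyRange_one_append (i - w) i _ (by omega) h2
    have hdrop : (PySem.List.pyRange (i - w) (ts.length : Int) 1).map (fun j => PySem.List.pyGetD ts j 0)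
        = ts.drop (i - w).toNat := by
      have := PySem.List.map_pyGetD_pyRange ts 0 (a := i - w) hiw
      simpa [PySem.List.len] using this
    have hlen : ((PySem.List.pyRange (i - w) i 1).map (fun j => PySem.List.pyGetD ts j 0)).length
        = (i - (i - w)).toNat := by
      simp [PySem.List.length_pyRange_one]
    have htake : (PySem.List.pyRange (i - w) i 1).map (fun j => PySem.List.pyGetD ts j 0)
        = (ts.drop (i - w).toNat).take ((i - (i - w)).toNat) := by
      rw [← hdrop, hsplit, List.map_append, ← hlen, List.take_left]
    have hs := PySem.List.slice_toNat ts (a := i - w) (b := i) hiw hi0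
    rw [hfold, hshift, htake, hs]
    congr 1
    omega

-- main invariant of A's loop
lemma twLoopA_spec (ts : List Int) (w cut : Int) :
    ∀ (rest : List Int) (i : Int) (acc : List (List Int)), 0 ≤ i →
      i = (ts.length : Int) - rest.length →
      twLoopA ts w cut i rest acc
        = acc ++ ((PySem.List.pyRange (max i (max w 0)) (twStop cut (ts.length : Int) (max i (max w 0))) 1).map (twRowA ts w)) := by
  intro rest
  induction rest with
  | nil =>
    intro i acc hi0 hi
    simp at hi
    have : PySem.List.pyRange (max i (max w 0)) (twStop cut (ts.length : Int) (max i (max w 0))) 1 = [] := by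
      apply PySem.List.pyRange_one_eq_nil
      unfold twStop
      split_ifs <;> omega
    simp [twLoopA, this]
  | cons x r ih =>
    intro i acc hi0 hi
    have hiL : i < (ts.length : Int) := by
      simp at hi
      omega
    have hi1 : i + 1 = (ts.length : Int) - r.length := by
      simp at hi
      omega
    by_cases hlt : i < w
    · have hmax : max (i + 1) (max w 0) = max i (max w 0) := by omega
      rw [twLoopA, if_pos hlt, ih (i + 1) acc (by omega) hi1, hmax]
    · rw [not_lt] at hlt
      have hmaxi : max i (max w 0) = i := by omega
      by_cases hcut : i = cut
      · have : twStop cut (ts.length : Int) i = cut := by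
          unfold twStop
          rw [if_pos ⟨by omega, by omega⟩]
        rw [twLoopA, if_neg (by omega), if_pos hcut, hmaxi, this, hcut,
          PySem.List.pyRange_one_eq_nil (le_refl cut)]
        simp
      · have hmaxi1 : max (i + 1) (max w 0) = i + 1 := by omega
        have hstep : PySem.List.pyRange i (twStop cut (ts.length : Int) i) 1
            = i :: PySem.List.pyRange (i + 1) (twStop cut (ts.length : Int) (i + 1)) 1 := by
          unfold twStop
          by_cases hc : i ≤ cut ∧ cut < (ts.length : Int)
          · rw [if_pos hc, if_pos ⟨by omega, hc.2⟩]
            exact PySem.List.pyRange_one_cons (by omega)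
          · rw [if_neg hc, if_neg (by omega)]
            exact PySem.List.pyRange_one_cons hiL
        rw [twLoopA, if_neg (by omega), if_neg hcut,
          ih (i + 1) (acc ++ [twRowA ts w i]) (by omega) hi1, hmaxi, hmaxi1, hstep]
        simp

-- B's rolling buffer at index i, in closed form
def twBuf (ts : List Int) (w i : Int) : List Int :=
  (ts.take i.toNat).drop ((i - max w 0).toNat)

-- one step of the rolling buffer preserves the closed form
lemma twStep_buf (ts : List Int) (w i : Int) (hi0 : 0 ≤ i) (hiL : i.toNat < ts.length) :
    twStep w (twBuf ts w i) (ts[i.toNat]) = twBuf ts w (i + 1) := by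
  have hk : (i - max w 0).toNat ≤ (ts.take i.toNat).length := by
    simp [List.length_take]
    omega
  have htake : ts.take (i.toNat + 1) = ts.take i.toNat ++ [ts[i.toNat]] := by
    rw [List.take_succ, List.getElem?_eq_getElem hiL]
    rfl
  have hb : twBuf ts w i ++ [ts[i.toNat]] = (ts.take (i.toNat + 1)).drop ((i - max w 0).toNat) := by
    rw [htake, List.drop_append_of_le_length hk, twBuf]
  have hlen : ((twBuf ts w i ++ [ts[i.toNat]]).length : Int)
      = i + 1 - ((i - max w 0).toNat : Int) := by
    rw [hb]
    simp [List.length_drop, List.length_take]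
    omega
  by_cases hc : max w 0 ≤ i
  · have hcond : w < ((twBuf ts w i ++ [ts[i.toNat]]).length : Int) := by
      rw [hlen]; omega
    have h1 : (i + 1).toNat = i.toNat + 1 := by omega
    have h2 : (i + 1 - max w 0).toNat = (i - max w 0).toNat + 1 := by omega
    rw [hb] at hcond
    simp only [twStep, hb]
    rw [if_pos hcond, List.drop_drop, twBuf, h1, h2]
  · -- i < max w 0, hence 0 < w and the buffer is still filling up
    have hw : 0 < w := by omega
    have hcond : ¬ w < ((twBuf ts w i ++ [ts[i.toNat]]).length : Int) := by
      rw [hlen]; omega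
    have h1 : (i + 1).toNat = i.toNat + 1 := by omega
    have h2 : (i + 1 - max w 0).toNat = (i - max w 0).toNat := by omega
    rw [hb] at hcond
    simp only [twStep, hb]
    rw [if_neg hcond, twBuf, h1, h2]

-- the buffer equals the slice A's row computes
lemma twBuf_eq_slice (ts : List Int) (w i : Int)
    (h1 : max w 0 ≤ i) (h2 : i ≤ (ts.length : Int)) :
    twBuf ts w i = PySem.List.slice ts (some (i - w)) (some i) := by
  have hi0 : 0 ≤ i := le_trans (le_max_right _ _) h1
  by_cases hw : w ≤ 0
  · have hs := PySem.List.slice_toNat ts (a := i - w) (b := i) (by omega) hi0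
    have : (i.toNat - (i - w).toNat) = 0 := by omega
    rw [hs, this, List.take_zero, twBuf]
    have : (i - max w 0).toNat = i.toNat := by omega
    rw [this, List.drop_eq_nil_of_le]
    simp [List.length_take]
  · rw [not_le] at hw
    have hmw : max w 0 = w := by omega
    have hs := PySem.List.slice_toNat ts (a := i - w) (b := i) (by omega) hi0
    rw [hs, twBuf, hmw, List.drop_take]

-- main invariant of B's loop
lemma twLoopB_spec (ts : List Int) (w cut : Int) :
    ∀ (cur : List Int) (i : Int) (rows : List (List Int)), 0 ≤ i →
      ts.drop i.toNat = cur →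
      twLoopB w cut i cur rows (twBuf ts w i)
        = rows ++ ((PySem.List.pyRange (max i (max w 0)) (twStop cut (ts.length : Int) (max i (max w 0))) 1).map (fun j => PySem.List.slice ts (some (j - w)) (some j))) := by
  intro cur
  induction cur with
  | nil =>
    intro i rows hi0 hdrop
    have hL : (ts.length : Int) ≤ i := by
      have := List.drop_eq_nil_iff.mp hdrop
      omega
    have : PySem.List.pyRange (max i (max w 0)) (twStop cut (ts.length : Int) (max i (max w 0))) 1 = [] := by
      apply PySem.List.pyRange_one_eq_nil
      unfold twStop
      split_ifs <;> omega
    simp [twLoopB, this]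
  | cons dp rest ih =>
    intro i rows hi0 hdrop
    have hiL : i.toNat < ts.length := by
      by_contra h
      rw [List.drop_eq_nil_of_le (by omega)] at hdrop
      exact List.cons_ne_nil dp rest hdrop.symm
    have hget : ts.drop i.toNat = ts[i.toNat] :: ts.drop (i.toNat + 1) :=
      List.drop_eq_getElem_cons hiL
    rw [hdrop] at hget
    have hc := List.cons_eq_cons.mp hget
    have hdp : dp = ts[i.toNat] := hc.1
    have hrest : ts.drop (i + 1).toNat = rest := by
      have h1 : (i + 1).toNat = i.toNat + 1 := by omega
      rw [h1, ← hc.2]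
    have hstepb : twStep w (twBuf ts w i) dp = twBuf ts w (i + 1) := by
      rw [hdp]; exact twStep_buf ts w i hi0 hiL
    by_cases hle : w ≤ i
    · have hmaxi : max i (max w 0) = i := by omega
      by_cases hcut : i = cut
      · have : twStop cut (ts.length : Int) i = cut := by
          unfold twStop
          rw [if_pos ⟨by omega, by omega⟩]
        rw [twLoopB, if_pos hle, if_pos hcut, hmaxi, this, hcut,
          PySem.List.pyRange_one_eq_nil (le_refl cut)]
        simp
      · have hmaxi1 : max (i + 1) (max w 0) = i + 1 := by omega
        have hstep : PySem.List.pyRange i (twStop cut (ts.length : Int) i) 1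
            = i :: PySem.List.pyRange (i + 1) (twStop cut (ts.length : Int) (i + 1)) 1 := by
          unfold twStop
          by_cases hc : i ≤ cut ∧ cut < (ts.length : Int)
          · rw [if_pos hc, if_pos ⟨by omega, hc.2⟩]
            exact PySem.List.pyRange_one_cons (by omega)
          · rw [if_neg hc, if_neg (by omega)]
            exact PySem.List.pyRange_one_cons (by omega)
        have hrow : twBuf ts w i = PySem.List.slice ts (some (i - w)) (some i) :=
          twBuf_eq_slice ts w i (by omega) (by omega)
        rw [twLoopB, if_pos hle, if_neg hcut, hstepb,
          ih (i + 1) (rows ++ [twBuf ts w i]) (by omega) hrest, hmaxi, hmaxi1, hstep, hrow]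
        simp
    · have hmax : max (i + 1) (max w 0) = max i (max w 0) := by omega
      rw [twLoopB, if_neg hle, hstepb, ih (i + 1) rows (by omega) hrest, hmax]

-- ===== VERDICT (by name: the statement is the Claim_ definition above) =====
theorem to_window_datapoints_matrix_spec : Claim_equal_to_window_datapoints_matrix := by
  intro ts w f e _
  unfold Spec_to_window_datapoints_matrix to_window_datapoints_matrix to_window_datapoints_matrix_alt
  have hbuf0 : twBuf ts w 0 = [] := by simp [twBuf]
  rw [twLoopA_spec ts w ((ts.length : Int) - f) ts 0 [] (le_refl 0) (by simp),
    ← hbuf0, twLoopB_spec ts w ((ts.length : Int) - f) ts 0 [] (le_refl 0) (by simp)]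
  simp only [List.nil_append]
  apply List.map_congr_left
  intro i hmem
  rw [PySem.List.mem_pyRange_one] at hmem
  apply twRowA_eq_slice
  · omega
  · rcases hmem with ⟨h1, h2⟩
    unfold twStop at h2
    split_ifs at h2 <;> omega
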